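-- pv_equiv track=rewrite | github.com/Lightning-AI/lightning-thunder | thunder/core/interpreter.py | _match_keys_impl
-- ===== SOURCE A (Python) =====
-- def _match_keys_impl(keys, subject):
--     marker = object()
--     values_or_none = []
--     for k in keys:
--         v = subject.get(k, marker)
--         if v is not marker:
--             values_or_none.append(v)
--         else:
--             values_or_none = None
--             break
--
--     return tuple(values_or_none) if values_or_none is not None else None
-- ===== SOURCE B (Python) =====
-- def _match_keys_impl(keys, subject):
--     if all(k in subject for k in keys):
--         return tuple(subject[k] for k in keys)
--     return None
-- ===== Notes on version B (the rewrite author's own statement) =====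
-- stated objective: idiomatic
-- what changed: Replaced A's sentinel-object/early-break accumulator loop with a check-all-membership pass followed by a direct tuple build.
import Mathlib
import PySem

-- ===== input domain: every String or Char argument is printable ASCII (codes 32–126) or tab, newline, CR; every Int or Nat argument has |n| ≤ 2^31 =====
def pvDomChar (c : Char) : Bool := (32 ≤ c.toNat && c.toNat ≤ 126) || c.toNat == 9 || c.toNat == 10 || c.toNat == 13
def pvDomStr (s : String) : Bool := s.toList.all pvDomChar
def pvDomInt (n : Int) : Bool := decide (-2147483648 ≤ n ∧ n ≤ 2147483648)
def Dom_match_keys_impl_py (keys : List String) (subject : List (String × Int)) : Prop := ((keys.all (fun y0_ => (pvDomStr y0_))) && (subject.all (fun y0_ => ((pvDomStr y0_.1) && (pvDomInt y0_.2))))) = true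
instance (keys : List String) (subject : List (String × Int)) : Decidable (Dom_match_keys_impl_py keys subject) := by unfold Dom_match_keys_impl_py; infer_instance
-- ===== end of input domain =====

-- B replaces A's sentinel-and-early-break accumulator loop with a check-all-membership pass then a direct build (idiomatic decomposition, same cost).


-- ===== PORT A =====
-- Port of A: loop over keys with accumulator, early break to none on a missing key.
def matchKeysGo (subject : List (String × Int)) : List String → List Int → Option (List Int)
  | [], acc => some acc
  | k :: ks, acc =>
    match (PySem.Dict.mk subject).get? k with
    | some v => matchKeysGo subject ks (acc ++ [v])
    | none => none

def match_keys_impl_py (keys : List String) (subject : List (String × Int)) : Option (List Int) :=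
  matchKeysGo subject keys []

-- ===== PORT B =====
-- Port of B: one membership pass, then (if all present) a direct map; dict[k] (guarded, never missing) ported as get? + getD 0.
def match_keys_impl_py_alt (keys : List String) (subject : List (String × Int)) : Option (List Int) :=
  if keys.all (fun k => (PySem.Dict.mk subject).contains k) then
    some (keys.map (fun k => ((PySem.Dict.mk subject).get? k).getD 0))
  else
    none

-- ===== PRECONDITION & SPEC =====
def Spec_match_keys_impl_py (keys : List String) (subject : List (String × Int)) (out : Option (List Int)) : Prop := out = match_keys_impl_py_alt keys subject
instance (keys : List String) (subject : List (String × Int)) (out : Option (List Int)) : Decidable (Spec_match_keys_impl_py keys subject out) := by unfold Spec_match_keys_impl_py; infer_instance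

-- ===== CLAIM (what is proved, stated in full; the proofs are below) =====
def Claim_equal_match_keys_impl_py : Prop := ∀ (keys : List String) (subject : List (String × Int)), Dom_match_keys_impl_py keys subject → Spec_match_keys_impl_py keys subject (match_keys_impl_py keys subject)

-- ===== LEMMAS AND PROOFS =====
lemma matchKeysGo_eq (subject : List (String × Int)) (keys : List String) (acc : List Int) :
    matchKeysGo subject keys acc =
      if keys.all (fun k => (PySem.Dict.mk subject).contains k) then
        some (acc ++ keys.map (fun k => ((PySem.Dict.mk subject).get? k).getD 0))
      else none := by
  induction keys generalizing acc with
  | nil => simp [matchKeysGo]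
  | cons k ks ih =>
    simp only [matchKeysGo, List.all_cons, List.map_cons]
    rcases h : (PySem.Dict.mk subject).get? k with _ | v
    · have hf : subject.find? (fun p => p.1 == k) = none := by
        simpa [PySem.Dict.get?, Option.map_eq_none_iff] using h
      have hc : (subject.any fun p => p.1 == k) = false := by
        rw [List.any_eq_false]
        intro p hp
        simpa using List.find?_eq_none.mp hf p hp
      simp [PySem.Dict.contains, hc]
    · have hc : (subject.any fun p => p.1 == k) = true := by
        cases hfind : subject.find? (fun p => p.1 == k) with
        | none => simp [PySem.Dict.get?, hfind] at h
        | some p =>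
          exact List.any_eq_true.mpr
            ⟨p, List.mem_of_find?_eq_some hfind, by simpa using List.find?_some hfind⟩
      have h2 := ih (acc ++ [v])
      simp only [PySem.Dict.contains, hc, Bool.true_and, List.append_assoc,
        List.singleton_append] at h2 ⊢
      exact h2

-- ===== VERDICT (by name: the statement is the Claim_ definition above) =====
theorem match_keys_impl_py_spec : Claim_equal_match_keys_impl_py := by
  intro keys subject _
  unfold Spec_match_keys_impl_py match_keys_impl_py match_keys_impl_py_alt
  simp [matchKeysGo_eq]
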